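-- pv_equiv track=rewrite | github.com/david12345abc/DashboardBack | getkpi/fot_techdir_fact.py | collect_plan_subtrees
-- ===== SOURCE A (Python) =====
-- def collect_plan_subtrees(by_parent, plan_group_roots: dict[str, list[str]]):
--     result = {}
--     for display_name, root_keys in plan_group_roots.items():
--         keys = set()
--         stack = list(root_keys)
--         while stack:
--             current = stack.pop()
--             if current in keys:
--                 continue
--             keys.add(current)
--             for child in by_parent.get(current, []):
--                 child_key = child.get("Ref_Key")
--                 if child_key:
--                     stack.append(child_key)
--         result[display_name] = keys
--     return result
-- ===== SOURCE B (Python) =====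
-- def collect_plan_subtrees(by_parent, plan_group_roots: dict[str, list[str]]):
--     # Recursive DFS instead of an explicit stack; the call stack carries the
--     # traversal.  reversed() makes the visit order match the LIFO pop order of
--     # the stack version — irrelevant to the returned sets, which are unordered.
--     result = {}
--     for display_name, root_keys in plan_group_roots.items():
--         keys = set()
--
--         def visit(key):
--             if key in keys:
--                 return
--             keys.add(key)
--             for child in reversed(by_parent.get(key, [])):
--                 child_key = child.get("Ref_Key")
--                 if child_key:
--                     visit(child_key)
--
--         for key in reversed(root_keys):
--             visit(key)
--         result[display_name] = keys
--     return result
-- ===== Notes on version B (the rewrite author's own statement) =====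
-- stated objective: alternative
-- what changed: Replaces A's explicit stack + while-loop DFS with a recursive DFS (an inner visit() that recurses over each node's children), keeping the shared visited-set guard and truthy Ref_Key filtering.
import Mathlib
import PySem

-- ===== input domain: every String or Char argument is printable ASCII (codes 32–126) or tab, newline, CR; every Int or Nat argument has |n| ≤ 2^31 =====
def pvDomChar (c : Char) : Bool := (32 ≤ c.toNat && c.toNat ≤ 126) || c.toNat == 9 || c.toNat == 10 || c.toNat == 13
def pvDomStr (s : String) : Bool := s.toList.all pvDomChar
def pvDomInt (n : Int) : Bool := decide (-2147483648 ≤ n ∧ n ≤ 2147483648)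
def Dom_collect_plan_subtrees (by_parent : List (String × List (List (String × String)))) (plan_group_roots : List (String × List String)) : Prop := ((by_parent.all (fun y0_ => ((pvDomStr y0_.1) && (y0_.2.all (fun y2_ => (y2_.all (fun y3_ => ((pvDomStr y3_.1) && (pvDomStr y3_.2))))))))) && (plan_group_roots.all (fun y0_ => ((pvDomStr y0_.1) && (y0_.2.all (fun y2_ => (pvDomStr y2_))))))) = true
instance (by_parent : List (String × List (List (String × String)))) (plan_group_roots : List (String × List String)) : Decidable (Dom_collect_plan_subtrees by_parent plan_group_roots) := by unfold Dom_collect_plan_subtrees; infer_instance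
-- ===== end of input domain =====

-- B replaces A's explicit-stack loop by recursive DFS (call-stack recursion over the
-- children lists, visited in LIFO order); same return value, no speed claim.

-- shared helper: child.get("Ref_Key") with Python truthiness ('' and missing are falsy)
def pvChildKey? (child : List (String × String)) : Option String :=
  match (PySem.Dict.ofList child).get? "Ref_Key" with
  | some ck => if ck = "" then none else some ck
  | none => none

-- shared helper: the (truthy) child keys of by_parent.get(k, [])
def pvChildrenOf (by_parent : List (String × List (List (String × String)))) (k : String) : List String :=
  ((PySem.Dict.ofList by_parent).getD k []).filterMap pvChildKey?

-- all child keys any lookup can ever yield (termination universe for the DFS loops)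
def pvU (by_parent : List (String × List (List (String × String)))) : List String :=
  ((PySem.Dict.ofList by_parent).items).flatMap (fun p => p.2.filterMap pvChildKey?)

def pvW (by_parent : List (String × List (List (String × String)))) : Nat := (pvU by_parent).length + 1

def pvMeasA (by_parent : List (String × List (List (String × String)))) (stack : List String) (keys : PySem.Set String) : Nat :=
  ((stack ++ pvU by_parent).toFinset \ keys.toFinset).card * pvW by_parent + stack.length

lemma pvChildrenOf_subset_pvU (by_parent : List (String × List (List (String × String)))) (k : String) :
    ∀ x ∈ pvChildrenOf by_parent k, x ∈ pvU by_parent := by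
  intro x hx
  unfold pvChildrenOf at hx
  unfold pvU
  rcases h : (PySem.Dict.ofList by_parent).get? k with _ | v
  · rw [PySem.Dict.getD_of_get?_eq_none _ _ h] at hx; simp at hx
  · rw [PySem.Dict.getD_of_get?_eq_some _ _ h] at hx
    have hmem := PySem.Dict.mem_items_of_get?_eq_some _ h
    exact List.mem_flatMap.mpr ⟨(k, v), hmem, hx⟩

lemma pvChildren_len_lt (by_parent : List (String × List (List (String × String)))) (k : String) :
    (pvChildrenOf by_parent k).length < pvW by_parent := by
  unfold pvChildrenOf pvW pvU
  rcases h : (PySem.Dict.ofList by_parent).get? k with _ | v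
  · rw [PySem.Dict.getD_of_get?_eq_none _ _ h]; simp
  · rw [PySem.Dict.getD_of_get?_eq_some _ _ h]
    have hmem := PySem.Dict.mem_items_of_get?_eq_some _ h
    have : (v.filterMap pvChildKey?).length
        ≤ (((PySem.Dict.ofList by_parent).items).flatMap (fun p => p.2.filterMap pvChildKey?)).length := by
      rw [List.length_flatMap]
      calc (v.filterMap pvChildKey?).length
          = (fun p : String × List (List (String × String)) => (p.2.filterMap pvChildKey?).length) (k, v) := rfl
        _ ≤ _ := List.single_le_sum (by intro x hx; omega) _ (List.mem_map.mpr ⟨(k, v), hmem, rfl⟩)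
    omega

lemma pvMeasA_dec_mem (by_parent : List (String × List (List (String × String)))) (stack : List String)
    (keys : PySem.Set String) (current : String) (h : stack.getLast? = some current) (_hc : current ∈ keys) :
    pvMeasA by_parent stack.dropLast keys < pvMeasA by_parent stack keys := by
  have hne : stack ≠ [] := by intro e; rw [e] at h; simp at h
  have hsub : (stack.dropLast ++ pvU by_parent).toFinset ⊆ (stack ++ pvU by_parent).toFinset := by
    intro x hx
    simp only [List.mem_toFinset, List.mem_append] at hx ⊢
    rcases hx with hx | hx
    · exact Or.inl (List.dropLast_subset _ hx)
    · exact Or.inr hx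
  have hcard : ((stack.dropLast ++ pvU by_parent).toFinset \ keys.toFinset).card
      ≤ ((stack ++ pvU by_parent).toFinset \ keys.toFinset).card :=
    Finset.card_le_card (Finset.sdiff_subset_sdiff hsub (Finset.Subset.refl _))
  have hlen : stack.dropLast.length < stack.length := by
    have := List.length_pos_iff.mpr hne
    simp [List.length_dropLast]; omega
  have := Nat.mul_le_mul_right (pvW by_parent) hcard
  unfold pvMeasA; omega

lemma pvMeasA_dec_new (by_parent : List (String × List (List (String × String)))) (stack : List String)
    (keys : PySem.Set String) (current : String) (h : stack.getLast? = some current) (hc : current ∉ keys) :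
    pvMeasA by_parent (stack.dropLast ++ pvChildrenOf by_parent current) (PySem.Set.add keys current)
      < pvMeasA by_parent stack keys := by
  have hne : stack ≠ [] := by intro e; rw [e] at h; simp at h
  have hcur : current ∈ stack := by
    have h2 := List.getLast?_eq_some_getLast hne
    rw [h2] at h
    exact (Option.some_inj.mp h) ▸ List.getLast_mem hne
  have hcurF : current ∈ (stack ++ pvU by_parent).toFinset \ keys.toFinset := by
    simp [List.mem_toFinset, hcur, hc]
  have hadd : (PySem.Set.add keys current) = keys ++ [current] := PySem.Set.add_of_not_mem hc
  have hsub : ((stack.dropLast ++ pvChildrenOf by_parent current) ++ pvU by_parent).toFinset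
        \ (PySem.Set.add keys current).toFinset
      ⊆ ((stack ++ pvU by_parent).toFinset \ keys.toFinset).erase current := by
    intro x hx
    rw [Finset.mem_sdiff] at hx
    obtain ⟨hx1, hx2⟩ := hx
    have hxne : x ≠ current := by
      intro e; apply hx2; rw [hadd, e]; simp
    have hxk : x ∉ keys.toFinset := by
      intro e; apply hx2; rw [hadd]; simp only [List.toFinset_append, Finset.mem_union]; exact Or.inl e
    rw [Finset.mem_erase]
    refine ⟨hxne, Finset.mem_sdiff.mpr ⟨?_, hxk⟩⟩
    simp only [List.mem_toFinset, List.mem_append] at hx1 ⊢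
    rcases hx1 with (hx1 | hx1) | hx1
    · exact Or.inl (List.dropLast_subset _ hx1)
    · exact Or.inr (pvChildrenOf_subset_pvU _ _ _ hx1)
    · exact Or.inr hx1
  have hcard : (((stack.dropLast ++ pvChildrenOf by_parent current) ++ pvU by_parent).toFinset
        \ (PySem.Set.add keys current).toFinset).card
      ≤ ((stack ++ pvU by_parent).toFinset \ keys.toFinset).card - 1 := by
    calc _ ≤ (((stack ++ pvU by_parent).toFinset \ keys.toFinset).erase current).card :=
            Finset.card_le_card hsub
      _ = _ := Finset.card_erase_of_mem hcurF
  have hpos : 1 ≤ ((stack ++ pvU by_parent).toFinset \ keys.toFinset).card :=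
    Finset.card_pos.mpr ⟨current, hcurF⟩
  have hch : (pvChildrenOf by_parent current).length < pvW by_parent := pvChildren_len_lt by_parent current
  have hmul := Nat.mul_le_mul_right (pvW by_parent) hcard
  have hlen : stack.length = stack.dropLast.length + 1 := by
    have := List.length_pos_iff.mpr hne
    simp [List.length_dropLast]; omega
  unfold pvMeasA
  rw [List.append_assoc]
  have hW : 0 < pvW by_parent := by unfold pvW; omega
  have hx := Nat.sub_add_cancel hpos
  set a := (((stack.dropLast ++ (pvChildrenOf by_parent current ++ pvU by_parent)).toFinset) \ (PySem.Set.add keys current).toFinset).card with ha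
  set b := ((stack ++ pvU by_parent).toFinset \ keys.toFinset).card with hb
  have hab : a + 1 ≤ b := by
    have : a ≤ b - 1 := by rw [ha, hb]; rw [← List.append_assoc]; exact hcard
    omega
  have h2 := Nat.mul_le_mul_right (pvW by_parent) hab
  rw [add_mul, one_mul] at h2
  simp only [List.length_append]
  omega

-- ===== PORT A =====
-- A's while-loop: stack popped from the end, visited-check at pop, children pushed in order
def pvDfsA (by_parent : List (String × List (List (String × String)))) (stack : List String) (keys : PySem.Set String) : PySem.Set String :=
  match h : stack.getLast? with
  | none => keys
  | some current =>
    if hc : current ∈ keys then pvDfsA by_parent stack.dropLast keys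
    else pvDfsA by_parent (stack.dropLast ++ pvChildrenOf by_parent current) (PySem.Set.add keys current)
termination_by pvMeasA by_parent stack keys
decreasing_by
  · exact pvMeasA_dec_mem by_parent stack keys current h hc
  · exact pvMeasA_dec_new by_parent stack keys current h hc

def collect_plan_subtrees (by_parent : List (String × List (List (String × String)))) (plan_group_roots : List (String × List String)) : List (String × List String) :=
  ((PySem.Dict.ofList plan_group_roots).items.foldl
    (fun res p => res.insert p.1 (pvDfsA by_parent p.2 PySem.Set.empty))
    PySem.Dict.empty).items

-- ===== PORT B =====
-- B's recursive DFS: `pvDfsB bp fuel todo keys` maps B's `visit` over the pending list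
-- (the reversed roots at top level, the reversed children inside `visit`); the fuel —
-- consumed only when an unvisited key is entered — only makes the recursion total.
def pvDfsB (by_parent : List (String × List (List (String × String)))) : Nat → List String → PySem.Set String → PySem.Set String
  | _, [], keys => keys
  | fuel, k :: rest, keys =>
    if k ∈ keys then pvDfsB by_parent fuel rest keys
    else match fuel with
      | 0 => keys   -- unreachable: fuel bounds the number of distinct unvisited keys
      | f + 1 => pvDfsB by_parent (f + 1) rest
          (pvDfsB by_parent f ((pvChildrenOf by_parent k).reverse) (PySem.Set.add keys k))
termination_by fuel todo _ => (fuel, todo.length)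

def collect_plan_subtrees_alt (by_parent : List (String × List (List (String × String)))) (plan_group_roots : List (String × List String)) : List (String × List String) :=
  ((PySem.Dict.ofList plan_group_roots).items.foldl
    (fun res p => res.insert p.1
      (pvDfsB by_parent (p.2.length + (pvU by_parent).length) p.2.reverse PySem.Set.empty))
    PySem.Dict.empty).items

-- ===== PRECONDITION & SPEC =====
def Spec_collect_plan_subtrees (by_parent : List (String × List (List (String × String)))) (plan_group_roots : List (String × List String)) (out : List (String × List String)) : Prop := out = collect_plan_subtrees_alt by_parent plan_group_roots
instance (by_parent : List (String × List (List (String × String)))) (plan_group_roots : List (String × List String)) (out : List (String × List String)) : Decidable (Spec_collect_plan_subtrees by_parent plan_group_roots out) := by unfold Spec_collect_plan_subtrees; infer_instance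

-- ===== CLAIM (what is proved, stated in full; the proofs are below) =====
def Claim_equal_collect_plan_subtrees : Prop := ∀ (by_parent : List (String × List (List (String × String)))) (plan_group_roots : List (String × List String)), Dom_collect_plan_subtrees by_parent plan_group_roots → Spec_collect_plan_subtrees by_parent plan_group_roots (collect_plan_subtrees by_parent plan_group_roots)

-- ===== LEMMAS AND PROOFS =====

lemma pvToFinset_subset {l1 l2 : List String} (h : l1 ⊆ l2) : l1.toFinset ⊆ l2.toFinset := by
  intro x hx; rw [List.mem_toFinset] at *; exact h hx

lemma pvDfsA_nil (by_parent : List (String × List (List (String × String)))) (keys : PySem.Set String) :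
    pvDfsA by_parent [] keys = keys := by
  rw [pvDfsA]; rfl

lemma pvDfsA_concat (by_parent : List (String × List (List (String × String)))) (s : List String)
    (k : String) (keys : PySem.Set String) :
    pvDfsA by_parent (s ++ [k]) keys =
      if k ∈ keys then pvDfsA by_parent s keys
      else pvDfsA by_parent (s ++ pvChildrenOf by_parent k) (PySem.Set.add keys k) := by
  rw [pvDfsA]
  split
  · next h => simp at h
  · next current h =>
      rw [List.getLast?_concat] at h
      cases Option.some_inj.mp h
      rw [List.dropLast_concat]
      split_ifs with hc <;> rfl

-- the visited set only grows along A's loop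
lemma pvDfsA_mono (by_parent : List (String × List (List (String × String))))
    (stack : List String) (keys : PySem.Set String) :
    keys ⊆ pvDfsA by_parent stack keys := by
  induction stack, keys using pvDfsA.induct by_parent with
  | case1 stack keys h =>
      rw [List.getLast?_eq_none_iff] at h
      subst h; rw [pvDfsA_nil]
      exact fun x hx => hx
  | case2 stack keys current h hc ih =>
      have hst : stack = stack.dropLast ++ [current] := by
        have hne : stack ≠ [] := by intro e; rw [e] at h; simp at h
        have h2 := List.getLast?_eq_some_getLast hne
        rw [h2] at h
        conv_lhs => rw [← List.dropLast_append_getLast hne]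
        rw [Option.some_inj.mp h]
      rw [hst, pvDfsA_concat, if_pos hc]
      exact ih
  | case3 stack keys current h hc ih =>
      have hst : stack = stack.dropLast ++ [current] := by
        have hne : stack ≠ [] := by intro e; rw [e] at h; simp at h
        have h2 := List.getLast?_eq_some_getLast hne
        rw [h2] at h
        conv_lhs => rw [← List.dropLast_append_getLast hne]
        rw [Option.some_inj.mp h]
      rw [hst, pvDfsA_concat, if_neg hc]
      intro x hx
      exact ih ((PySem.Set.mem_add keys current x).mpr (Or.inl hx))

-- A's loop splits at any stack cut: the part above the cut runs after the part below
lemma pvDfsA_append (by_parent : List (String × List (List (String × String))))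
    (stack : List String) (keys : PySem.Set String) :
    ∀ s : List String, pvDfsA by_parent (s ++ stack) keys = pvDfsA by_parent s (pvDfsA by_parent stack keys) := by
  induction stack, keys using pvDfsA.induct by_parent with
  | case1 stack keys h =>
      intro s
      rw [List.getLast?_eq_none_iff] at h
      subst h; rw [pvDfsA_nil, List.append_nil]
  | case2 stack keys current h hc ih =>
      intro s
      have hst : stack = stack.dropLast ++ [current] := by
        have hne : stack ≠ [] := by intro e; rw [e] at h; simp at h
        have h2 := List.getLast?_eq_some_getLast hne
        rw [h2] at h
        conv_lhs => rw [← List.dropLast_append_getLast hne]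
        rw [Option.some_inj.mp h]
      rw [hst, ← List.append_assoc, pvDfsA_concat, if_pos hc, pvDfsA_concat, if_pos hc]
      exact ih s
  | case3 stack keys current h hc ih =>
      intro s
      have hst : stack = stack.dropLast ++ [current] := by
        have hne : stack ≠ [] := by intro e; rw [e] at h; simp at h
        have h2 := List.getLast?_eq_some_getLast hne
        rw [h2] at h
        conv_lhs => rw [← List.dropLast_append_getLast hne]
        rw [Option.some_inj.mp h]
      rw [hst, ← List.append_assoc, pvDfsA_concat, if_neg hc, pvDfsA_concat, if_neg hc,
        List.append_assoc]
      exact ih s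

lemma pvDfsB_nil (by_parent : List (String × List (List (String × String)))) (fuel : Nat)
    (keys : PySem.Set String) : pvDfsB by_parent fuel [] keys = keys := by
  rw [pvDfsB.eq_def]

lemma pvDfsB_cons_mem (by_parent : List (String × List (List (String × String)))) (fuel : Nat)
    (k : String) (rest : List String) (keys : PySem.Set String) (hc : k ∈ keys) :
    pvDfsB by_parent fuel (k :: rest) keys = pvDfsB by_parent fuel rest keys := by
  rw [pvDfsB.eq_def]; simp [hc]

lemma pvDfsB_cons_succ (by_parent : List (String × List (List (String × String)))) (f : Nat)
    (k : String) (rest : List String) (keys : PySem.Set String) (hc : k ∉ keys) :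
    pvDfsB by_parent (f + 1) (k :: rest) keys
      = pvDfsB by_parent (f + 1) rest
          (pvDfsB by_parent f ((pvChildrenOf by_parent k).reverse) (PySem.Set.add keys k)) := by
  rw [pvDfsB.eq_def]; simp [hc]

-- B's recursion (with enough fuel) computes exactly A's loop on the reversed worklist
lemma pvDfsB_eq_pvDfsA (by_parent : List (String × List (List (String × String))))
    (fuel : Nat) (todo : List String) (keys : PySem.Set String) :
    ((todo ++ pvU by_parent).toFinset \ keys.toFinset).card ≤ fuel →
    pvDfsB by_parent fuel todo keys = pvDfsA by_parent todo.reverse keys := by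
  induction fuel, todo, keys using pvDfsB.induct by_parent with
  | case1 fuel keys =>
      intro _
      rw [pvDfsB_nil, List.reverse_nil, pvDfsA_nil]
  | case2 fuel k rest keys hc ih =>
      intro hf
      rw [pvDfsB_cons_mem _ _ _ _ _ hc, List.reverse_cons, pvDfsA_concat, if_pos hc]
      apply ih
      refine le_trans (Finset.card_le_card (Finset.sdiff_subset_sdiff ?_ (Finset.Subset.refl _))) hf
      apply pvToFinset_subset
      intro x hx; rw [List.mem_append] at hx ⊢
      rcases hx with hx | hx
      · exact Or.inl (List.mem_cons_of_mem _ hx)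
      · exact Or.inr hx
  | case3 k rest keys hc =>
      intro hf
      exfalso
      have hk : k ∈ ((k :: rest ++ pvU by_parent).toFinset \ keys.toFinset) := by
        simp [hc]
      have := Finset.card_pos.mpr ⟨k, hk⟩
      omega
  | case4 k rest keys hc f ih_inner ih_outer =>
      intro hf
      have hkmem : k ∈ ((k :: rest ++ pvU by_parent).toFinset \ keys.toFinset) := by
        simp [hc]
      have hadd : PySem.Set.add keys k = keys ++ [k] := PySem.Set.add_of_not_mem hc
      -- the inner recursion has enough fuel
      have hb1 : (((pvChildrenOf by_parent k).reverse ++ pvU by_parent).toFinset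
            \ (PySem.Set.add keys k).toFinset).card ≤ f := by
        have hsub : ((pvChildrenOf by_parent k).reverse ++ pvU by_parent).toFinset
              \ (PySem.Set.add keys k).toFinset
            ⊆ ((k :: rest ++ pvU by_parent).toFinset \ keys.toFinset).erase k := by
          intro x hx
          rw [Finset.mem_sdiff] at hx
          obtain ⟨hx1, hx2⟩ := hx
          have hxne : x ≠ k := by intro e; apply hx2; rw [hadd, e]; simp
          have hxk : x ∉ keys.toFinset := by
            intro e; apply hx2; rw [hadd]
            simp only [List.toFinset_append, Finset.mem_union]; exact Or.inl e
          rw [Finset.mem_erase]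
          refine ⟨hxne, Finset.mem_sdiff.mpr ⟨?_, hxk⟩⟩
          simp only [List.mem_toFinset, List.mem_append, List.mem_reverse] at hx1 ⊢
          rcases hx1 with hx1 | hx1
          · exact Or.inr (pvChildrenOf_subset_pvU _ _ _ hx1)
          · exact Or.inr hx1
        have := Finset.card_le_card hsub
        rw [Finset.card_erase_of_mem hkmem] at this
        omega
      have hinner := ih_inner hb1
      rw [List.reverse_reverse] at hinner
      -- the outer recursion keeps enough fuel: the visited set only grew
      have hgrow : keys ⊆ pvDfsA by_parent (pvChildrenOf by_parent k) (PySem.Set.add keys k) := by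
        intro x hx
        exact pvDfsA_mono by_parent _ _ ((PySem.Set.mem_add keys k x).mpr (Or.inl hx))
      have hb2 : ((rest ++ pvU by_parent).toFinset
            \ (pvDfsB by_parent f ((pvChildrenOf by_parent k).reverse) (PySem.Set.add keys k)).toFinset).card
          ≤ f + 1 := by
        rw [hinner]
        refine le_trans (Finset.card_le_card
          (Finset.sdiff_subset_sdiff (pvToFinset_subset ?_) (pvToFinset_subset hgrow))) hf
        intro x hx; rw [List.mem_append] at hx ⊢
        rcases hx with hx | hx
        · exact Or.inl (List.mem_cons_of_mem _ hx)
        · exact Or.inr hx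
      have houter := ih_outer hb2
      rw [pvDfsB_cons_succ _ _ _ _ _ hc, houter, hinner, List.reverse_cons,
        pvDfsA_concat, if_neg hc, pvDfsA_append]

-- one plan group: B's recursive DFS over the reversed roots equals A's stack loop
lemma pvGroup_eq (by_parent : List (String × List (List (String × String)))) (roots : List String) :
    pvDfsB by_parent (roots.length + (pvU by_parent).length) roots.reverse PySem.Set.empty
      = pvDfsA by_parent roots PySem.Set.empty := by
  have hb : ((roots.reverse ++ pvU by_parent).toFinset \ (PySem.Set.empty : PySem.Set String).toFinset).card
      ≤ roots.length + (pvU by_parent).length := by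
    have h1 : (PySem.Set.empty : PySem.Set String).toFinset = ∅ := rfl
    rw [h1, Finset.sdiff_empty]
    calc (roots.reverse ++ pvU by_parent).toFinset.card
        ≤ (roots.reverse ++ pvU by_parent).length := List.toFinset_card_le _
      _ = roots.length + (pvU by_parent).length := by simp
  rw [pvDfsB_eq_pvDfsA by_parent _ _ _ hb, List.reverse_reverse]

-- ===== VERDICT (by name: the statement is the Claim_ definition above) =====
theorem collect_plan_subtrees_spec : Claim_equal_collect_plan_subtrees := by
  unfold Claim_equal_collect_plan_subtrees Spec_collect_plan_subtrees
  intro by_parent plan_group_roots _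
  unfold collect_plan_subtrees collect_plan_subtrees_alt
  have hfg : (fun (res : PySem.Dict String (List String)) (p : String × List String) =>
        res.insert p.1 (pvDfsA by_parent p.2 PySem.Set.empty))
      = (fun (res : PySem.Dict String (List String)) (p : String × List String) =>
        res.insert p.1 (pvDfsB by_parent (p.2.length + (pvU by_parent).length) p.2.reverse PySem.Set.empty)) := by
    funext res p
    rw [pvGroup_eq]
  rw [hfg]
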